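-- pv_equiv track=rewrite | github.com/Time1043/hyz-code-python2 | code_python_spider/code_python_spider1/algorithm/dp6.py | num_decodings4
-- ===== SOURCE A (Python) =====
-- MOD = 10 ** 9 + 7
--
-- def num_decodings4(s):
--     """ 优化空间：三个变量的滑动窗口 """
--     nt, nt_nt = 1, 0  # dp[n+1]=0 不存在的
--
--     for i in range(len(s) - 1, -1, -1):
--         if s[i] == '0':
--             cur = 0
--         else:
--             # [i]
--             cur = nt * (9 if (s[i] == '*') else 1)
--
--             # [i][i+1]  检查[i+1]是否越界
--             if i + 1 < len(s):
--                 # [][]  (排除 04 40 )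
--                 if (s[i] != '*' and s[i + 1] != '*') and (10 <= int(s[i:i + 2]) <= 26):
--                     cur += nt_nt
--                 # [][*]
--                 elif s[i] != '*' and s[i + 1] == '*':
--                     multipliers = {'1': 9, '2': 6}
--                     cur += nt_nt * (multipliers[s[i]] if (s[i] in multipliers) else 0)
--                 # [*][]
--                 elif s[i] == '*' and s[i + 1] != '*':
--                     cur += nt_nt * (2 if s[i + 1] in '0123456' else 1)
--                 # [*][*]
--                 elif s[i] == '*' and s[i + 1] == '*':
--                     cur += nt_nt * 15
--
--         nt_nt, nt = nt, cur
--
--     return nt % MOD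
-- ===== SOURCE B (Python) =====
-- MOD = 10 ** 9 + 7
--
-- def _mat(a, b):
--     """2x2 transfer matrix for a position holding a, followed by b (None past the end)."""
--     if a == '0':
--         w1 = 0
--     elif a == '*':
--         w1 = 9
--     else:
--         w1 = 1
--     if b is None:
--         w2 = 0
--     elif a == '*' and b == '*':
--         w2 = 15
--     elif a == '*':
--         w2 = 2 if b in '0123456' else 1
--     elif a == '0':
--         w2 = 0
--     elif b == '*':
--         w2 = {'1': 9, '2': 6}.get(a, 0)
--     else:
--         w2 = 1 if 10 <= int(a + b) <= 26 else 0
--     return ((w1, w2), (1, 0))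
--
-- def _mul(x, y):
--     """2x2 integer matrix product"""
--     return ((x[0][0] * y[0][0] + x[0][1] * y[1][0], x[0][0] * y[0][1] + x[0][1] * y[1][1]),
--             (x[1][0] * y[0][0] + x[1][1] * y[1][0], x[1][0] * y[0][1] + x[1][1] * y[1][1]))
--
-- def num_decodings4(s):
--     """ decode count = top-left entry of the product of the per-position transfer matrices """
--     p = ((1, 0), (0, 1))
--     cs = list(s)
--     for a, b in zip(cs, cs[1:] + [None]):
--         p = _mul(p, _mat(a, b))
--     return p[0][0] % MOD
-- ===== Notes on version B (the rewrite author's own statement) =====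
-- stated objective: alternative
-- what changed: Recasts the problem as linear algebra: each position contributes a 2x2 transfer matrix (single-char and pair decode counts), and the answer is the top-left entry of the associative product of these matrices, computed by one forward fold of matrix multiplications over zipped character pairs, instead of A's backward index loop updating a two-variable sliding window with an elif cascade per step.
import Mathlib
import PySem

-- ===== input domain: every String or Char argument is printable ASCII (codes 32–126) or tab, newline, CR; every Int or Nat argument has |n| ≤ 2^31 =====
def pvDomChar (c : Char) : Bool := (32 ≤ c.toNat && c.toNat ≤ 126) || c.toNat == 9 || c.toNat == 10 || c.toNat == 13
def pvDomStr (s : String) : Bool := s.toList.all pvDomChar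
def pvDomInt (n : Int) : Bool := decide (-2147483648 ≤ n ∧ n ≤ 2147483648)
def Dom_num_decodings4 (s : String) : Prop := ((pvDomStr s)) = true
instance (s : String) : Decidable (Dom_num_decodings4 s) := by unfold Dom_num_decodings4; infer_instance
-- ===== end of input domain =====

-- B recasts A's backward sliding-window recurrence as the product of per-position 2x2 transfer matrices, folded forward (objective: alternative).

-- ===== PORT A =====
-- loop body of A's `for i in range(len(s)-1, -1, -1)`; state is (nt, nt_nt)
def pvStepA (cs : List Char) (st : Int × Int) (i : Int) : Int × Int :=
  let n : Int := cs.length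
  let nt := st.1
  let nt_nt := st.2
  let si := PySem.List.pyGetD cs i ' '      -- s[i]; i is always in range, the default is never used
  let cur :=
    if si = '0' then (0 : Int)
    else
      let cur := nt * (if si = '*' then 9 else 1)
      if i + 1 < n then
        let sj := PySem.List.pyGetD cs (i + 1) ' '   -- s[i+1]
        if si ≠ '*' ∧ sj ≠ '*' then
          -- int(s[i:i+2]); none = ValueError (excluded by Pre_), the default 0 is never used there
          let v := (PySem.Int.ofChars? (PySem.List.slice cs (some i) (some (i + 2)))).getD 0
          if 10 ≤ v ∧ v ≤ 26 then cur + nt_nt else cur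
        else if si ≠ '*' ∧ sj = '*' then
          -- multipliers = {'1': 9, '2': 6}; multipliers[s[i]] if s[i] in multipliers else 0
          cur + nt_nt * (if si = '1' then 9 else if si = '2' then 6 else 0)
        else if si = '*' ∧ sj ≠ '*' then
          cur + nt_nt * (if ['0','1','2','3','4','5','6'].contains sj then 2 else 1)  -- s[i+1] in '0123456'
        else if si = '*' ∧ sj = '*' then
          cur + nt_nt * 15
        else cur
      else cur
  (cur, nt)

def num_decodings4 (s : String) : Int :=
  let cs := s.toList
  let st := (PySem.List.pyRange ((cs.length : Int) - 1) (-1) (-1)).foldl (pvStepA cs) (1, 0)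
  PySem.Int.mod st.1 (10 ^ 9 + 7)

-- ===== PORT B =====
-- 2x2 transfer matrix for a position holding a, followed by b (none past the end)
def pvMat (a : Char) (b : Option Char) : (Int × Int) × (Int × Int) :=
  let w1 : Int := if a = '0' then 0 else if a = '*' then 9 else 1
  let w2 : Int :=
    match b with
    | none => 0
    | some b =>
      if a = '*' ∧ b = '*' then 15
      else if a = '*' then (if ['0','1','2','3','4','5','6'].contains b then 2 else 1)  -- b in '0123456'
      else if a = '0' then 0
      else if b = '*' then (if a = '1' then 9 else if a = '2' then 6 else 0)  -- {'1': 9, '2': 6}.get(a, 0)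
      else  -- int(a + b); none = ValueError (excluded by Pre_), the default 0 is never used there
        let v := (PySem.Int.ofChars? [a, b]).getD 0
        if 10 ≤ v ∧ v ≤ 26 then 1 else 0
  ((w1, w2), (1, 0))

-- 2x2 integer matrix product
def pvMul (x y : (Int × Int) × (Int × Int)) : (Int × Int) × (Int × Int) :=
  ((x.1.1 * y.1.1 + x.1.2 * y.2.1, x.1.1 * y.1.2 + x.1.2 * y.2.2),
   (x.2.1 * y.1.1 + x.2.2 * y.2.1, x.2.1 * y.1.2 + x.2.2 * y.2.2))

def num_decodings4_alt (s : String) : Int :=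
  let cs := s.toList
  let pairs := cs.zip ((PySem.List.slice cs (some 1) none).map some ++ [none])  -- zip(cs, cs[1:] + [None])
  let p := pairs.foldl (fun acc ab => pvMul acc (pvMat ab.1 ab.2)) ((1, 0), (0, 1))
  PySem.Int.mod p.1.1 (10 ^ 9 + 7)

-- ===== PRECONDITION & SPEC =====
-- Pre_ excludes exactly the inputs on which A raises ValueError: those with an adjacent pair s[i], s[i+1]
-- where s[i] is not '0' or '*', s[i+1] is not '*', and int(s[i:i+2]) does not parse.
def Pre_num_decodings4 (s : String) : Prop :=
  ∀ p ∈ s.toList.zip s.toList.tail,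
    p.1 = '0' ∨ p.1 = '*' ∨ p.2 = '*' ∨ (PySem.Int.ofChars? [p.1, p.2]).isSome = true
instance (s : String) : Decidable (Pre_num_decodings4 s) := by unfold Pre_num_decodings4; infer_instance
def pvWitness_num_decodings4 : String := "*12"

def Spec_num_decodings4 (s : String) (out : Int) : Prop := out = num_decodings4_alt s
instance (s : String) (out : Int) : Decidable (Spec_num_decodings4 s out) := by unfold Spec_num_decodings4; infer_instance

-- ===== CLAIM (what is proved, stated in full; the proofs are below) =====
def Claim_equal_num_decodings4 : Prop := ∀ (s : String), Dom_num_decodings4 s → Pre_num_decodings4 s → Spec_num_decodings4 s (num_decodings4 s)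

-- ===== LEMMAS AND PROOFS =====

-- the decode-count recurrence, written with B's matrix entries
def pvW1 (a : Char) : Int := if a = '0' then 0 else if a = '*' then 9 else 1

def pvW2 (a b : Char) : Int :=
  if a = '*' ∧ b = '*' then 15
  else if a = '*' then (if ['0','1','2','3','4','5','6'].contains b then 2 else 1)
  else if a = '0' then 0
  else if b = '*' then (if a = '1' then 9 else if a = '2' then 6 else 0)
  else
    let v := (PySem.Int.ofChars? [a, b]).getD 0
    if 10 ≤ v ∧ v ≤ 26 then 1 else 0

def pvCnt : List Char → Int
  | [] => 1
  | [c] => pvW1 c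
  | c :: d :: t => pvW1 c * pvCnt (d :: t) + pvW2 c d * pvCnt t

def pvTail : List Char → Int
  | [] => 0
  | _ :: t => pvCnt t

lemma pvMat_eval (a : Char) (b : Option Char) :
    pvMat a b = ((pvW1 a, match b with | none => 0 | some b => pvW2 a b), (1, 0)) := by
  cases b <;> rfl

lemma pvMul_assoc (x y z : (Int × Int) × (Int × Int)) :
    pvMul (pvMul x y) z = pvMul x (pvMul y z) := by
  simp only [pvMul, Prod.mk.injEq]
  refine ⟨⟨by ring, by ring⟩, by ring, by ring⟩

lemma pvMul_id_left (x : (Int × Int) × (Int × Int)) : pvMul ((1, 0), (0, 1)) x = x := by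
  simp only [pvMul]
  refine Prod.ext (Prod.ext ?_ ?_) (Prod.ext ?_ ?_) <;> ring

lemma pvMul_id_right (x : (Int × Int) × (Int × Int)) : pvMul x ((1, 0), (0, 1)) = x := by
  simp only [pvMul]
  refine Prod.ext (Prod.ext ?_ ?_) (Prod.ext ?_ ?_) <;> ring

-- pull the seed out of B's fold
lemma pvFold_shift (l : List (Char × Option Char)) :
    ∀ x, l.foldl (fun acc ab => pvMul acc (pvMat ab.1 ab.2)) x
      = pvMul x (l.foldl (fun acc ab => pvMul acc (pvMat ab.1 ab.2)) ((1, 0), (0, 1))) := by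
  induction l with
  | nil => intro x; simp [pvMul_id_right]
  | cons m l ih =>
    intro x
    simp only [List.foldl_cons]
    rw [ih (pvMul x (pvMat m.1 m.2)), ih (pvMul ((1, 0), (0, 1)) (pvMat m.1 m.2)),
      pvMul_id_left, pvMul_assoc]

-- the pair list B zips decomposes head-first
lemma pairs_cons (c : Char) (t : List Char) :
    (c :: t).zip ((PySem.List.slice (c :: t) (some 1) none).map some ++ [none])
      = (c, t.head?) :: t.zip ((PySem.List.slice t (some 1) none).map some ++ [none]) := by
  rw [PySem.List.slice_from_one, PySem.List.slice_from_one]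
  cases t <;> rfl

-- first column of B's matrix product = (pvCnt cs, pvTail cs)
lemma loopB (cs : List Char) :
    let P := (cs.zip ((PySem.List.slice cs (some 1) none).map some ++ [none])).foldl
      (fun acc ab => pvMul acc (pvMat ab.1 ab.2)) ((1, 0), (0, 1))
    P.1.1 = pvCnt cs ∧ P.2.1 = pvTail cs := by
  induction cs with
  | nil => exact ⟨rfl, rfl⟩
  | cons c t ih =>
    simp only at ih ⊢
    rw [pairs_cons, List.foldl_cons, pvMul_id_left]
    rw [pvFold_shift _ (pvMat (c, t.head?).1 (c, t.head?).2)]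
    rw [pvMat_eval]
    obtain ⟨h1, h2⟩ := ih
    cases t with
    | nil =>
      simp [pvMul, pvCnt, pvTail]
    | cons d t' =>
      simp only [List.head?_cons, pvMul, pvCnt, pvTail] at h1 h2 ⊢
      rw [h1, h2]
      constructor <;> ring

-- ===== A's loop =====
lemma pyRangeDown (n : Nat) : PySem.List.pyRange ((n : Int) - 1) (-1) (-1)
    = (List.range n).map (fun k : Nat => ((n : Int) - 1 - (k : Int))) := by
  simp only [PySem.List.pyRange]
  rw [if_neg (by norm_num)]
  cases n with
  | zero => norm_num
  | succ m =>
    rw [if_neg (by norm_num), if_pos (by push_cast; omega)]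
    have h2 : ((((m+1 : Nat) : Int) - 1 - -1 + - -1 - 1) / - -1).toNat = m + 1 := by push_cast; omega
    rw [h2]
    apply List.map_congr_left; intro k hk; push_cast; ring

-- shifting the backward loop body from c :: t to t
lemma stepA_shift (c : Char) (t : List Char) (j : Nat) (hj : j < t.length) (st : Int × Int) :
    pvStepA (c :: t) st ((j : Int) + 1) = pvStepA t st (j : Int) := by
  have hget1 : PySem.List.pyGetD (c :: t) ((j : Int) + 1) ' ' = PySem.List.pyGetD t (j : Int) ' ' := by
    have e : ((j : Int) + 1) = ((j + 1 : Nat) : Int) := by push_cast; ring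
    rw [e, PySem.List.pyGetD_natCast, PySem.List.pyGetD_natCast]
    simp [List.getD]
  have hget2 : PySem.List.pyGetD (c :: t) ((j : Int) + 1 + 1) ' ' = PySem.List.pyGetD t ((j : Int) + 1) ' ' := by
    have e : ((j : Int) + 1 + 1) = ((j + 2 : Nat) : Int) := by push_cast; ring
    have e2 : ((j : Int) + 1) = ((j + 1 : Nat) : Int) := by push_cast; ring
    rw [e, e2, PySem.List.pyGetD_natCast, PySem.List.pyGetD_natCast]
    simp [List.getD]
  have hslice : PySem.List.slice (c :: t) (some ((j : Int) + 1)) (some ((j : Int) + 1 + 2))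
      = PySem.List.slice t (some (j : Int)) (some ((j : Int) + 2)) := by
    have e2 : ((j : Int) + 1 + 2) = ((j + 3 : Nat) : Int) := by push_cast; ring
    have e1 : ((j : Int) + 1) = ((j + 1 : Nat) : Int) := by push_cast; ring
    have e3 : ((j : Int) + 2) = ((j + 2 : Nat) : Int) := by push_cast; ring
    rw [e2, e1, e3, PySem.List.slice_natCast, PySem.List.slice_natCast]
    simp only [List.drop_succ_cons]
    congr 1
    omega
  have hcond : (((j : Int) + 1) + 1 < (((c :: t).length : Nat) : Int)) ↔ ((j : Int) + 1 < ((t.length : Nat) : Int)) := by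
    simp only [List.length_cons]; push_cast; omega
  simp only [pvStepA, hget1, hget2, hslice, hcond]

-- the head step (index 0) computes the pvCnt recurrence
lemma stepA_head (c : Char) (t : List Char) :
    pvStepA (c :: t) (pvCnt t, pvTail t) 0 = (pvCnt (c :: t), pvCnt t) := by
  have hget0 : PySem.List.pyGetD (c :: t) 0 ' ' = c := PySem.List.pyGetD_zero_cons c t ' '
  cases t with
  | nil =>
    simp only [pvStepA, hget0]
    rw [if_neg (by simp : ¬ ((0 : Int) + 1 < (([c] : List Char).length : Int)))]
    simp only [pvCnt, pvW1]
    by_cases h0 : c = '0'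
    · simp [h0]
    · rw [if_neg h0, if_neg h0]
      by_cases hs : c = '*' <;> simp [hs]
  | cons d t' =>
    have hget1 : PySem.List.pyGetD (c :: d :: t') ((0 : Int) + 1) ' ' = d := by
      have e : ((0 : Int) + 1) = ((1 : Nat) : Int) := by norm_num
      rw [e, PySem.List.pyGetD_natCast]
      rfl
    have hslice : PySem.List.slice (c :: d :: t') (some 0) (some ((0 : Int) + 2)) = [c, d] := by
      have e : ((0 : Int) + 2) = ((2 : Nat) : Int) := by norm_num
      rw [PySem.List.slice_zero_start, e, PySem.List.slice_to_natCast]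
      rfl
    have hcond : ((0 : Int) + 1 < ((c :: d :: t').length : Int)) := by
      simp only [List.length_cons]; push_cast; omega
    have hrec : pvCnt (c :: d :: t') = pvW1 c * pvCnt (d :: t') + pvW2 c d * pvCnt t' := rfl
    simp only [pvStepA, hget0, hget1, hslice, if_pos hcond, pvTail, hrec, Prod.mk.injEq]
    refine ⟨?_, by trivial⟩
    by_cases h0 : c = '0'
    · subst h0
      simp [pvW1, pvW2]
    · rw [if_neg h0]
      by_cases hcs : c = '*'
      · subst hcs
        by_cases hds : d = '*'
        · subst hds
          simp [pvW1, pvW2]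
          ring_nf
        · simp [pvW1, pvW2, hds]
          ring_nf
      · by_cases hds : d = '*'
        · subst hds
          simp [pvW1, pvW2, hcs, h0]
          split_ifs <;> ring_nf
        · rw [if_pos ⟨hcs, hds⟩]
          have hw2 : pvW2 c d = if 10 ≤ (PySem.Int.ofChars? [c, d]).getD 0 ∧
              (PySem.Int.ofChars? [c, d]).getD 0 ≤ 26 then (1 : Int) else 0 := by
            unfold pvW2
            rw [if_neg (fun h => hcs h.1), if_neg hcs, if_neg h0, if_neg hds]
          simp only [pvW1, if_neg h0, if_neg hcs, hw2]
          by_cases hv : 10 ≤ (PySem.Int.ofChars? [c, d]).getD 0 ∧ (PySem.Int.ofChars? [c, d]).getD 0 ≤ 26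
          · rw [if_pos hv, if_pos hv]; ring
          · rw [if_neg hv, if_neg hv]; ring

-- the whole backward loop computes (pvCnt cs, pvTail cs)
lemma loopA (cs : List Char) :
    (PySem.List.pyRange ((cs.length : Int) - 1) (-1) (-1)).foldl (pvStepA cs) (1, 0)
      = (pvCnt cs, pvTail cs) := by
  induction cs with
  | nil => simp [pvCnt, pvTail]
  | cons c t ih =>
    rw [pyRangeDown]
    have hsplit : List.range (c :: t).length = List.range t.length ++ [t.length] := by
      simp [List.range_succ]
    rw [hsplit, List.map_append, List.foldl_append]
    have hfront : (List.range t.length).map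
          (fun k : Nat => (((c :: t).length : Int) - 1 - (k : Int)))
        = (List.range t.length).map
          (fun k : Nat => (((t.length : Int) - 1 - (k : Int)) + 1)) := by
      apply List.map_congr_left; intro k hk
      simp only [List.length_cons]; push_cast; ring
    rw [hfront]
    have hshift : ((List.range t.length).map
          (fun k : Nat => (((t.length : Int) - 1 - (k : Int)) + 1))).foldl (pvStepA (c :: t)) (1, 0)
        = ((List.range t.length).map
          (fun k : Nat => ((t.length : Int) - 1 - (k : Int)))).foldl (pvStepA t) (1, 0) := by
      rw [List.foldl_map, List.foldl_map]
      apply PySem.List.foldl_congr_mem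
      intro st k hk
      have hk' : k < t.length := List.mem_range.mp hk
      have e : (t.length : Int) - 1 - (k : Int) = ((t.length - 1 - k : Nat) : Int) := by omega
      rw [e]
      exact stepA_shift c t (t.length - 1 - k) (by omega) st
    rw [hshift, ← pyRangeDown, ih]
    simp only [List.map_cons, List.map_nil, List.foldl_cons, List.foldl_nil]
    have hlast : (((c :: t).length : Int) - 1 - ((t.length : Nat) : Int)) = 0 := by
      simp only [List.length_cons]; push_cast; ring
    rw [hlast, stepA_head c t]
    simp [pvTail]

-- ===== VERDICT (by name: the statement is the Claim_ definition above) =====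
theorem num_decodings4_spec : Claim_equal_num_decodings4 := by
  intro s _ _
  unfold Spec_num_decodings4 num_decodings4 num_decodings4_alt
  simp only [loopA s.toList, (loopB s.toList).1]
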